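-- pv_equiv track=rewrite | github.com/AdamPiechowiak/Tree | skrypt.py | operacja7
-- ===== SOURCE A (Python) =====
-- import string
--
-- alfabet = string.ascii_lowercase
--
-- def operacja7(liczba):
-- 	tekst = str(liczba)
-- 	n = int(len(tekst)/2)
-- 	wynik = ""
-- 	for i in range(n):
-- 		wynik = wynik + alfabet[int(tekst[i*2:i*2+2])%26]
-- 	if(len(tekst)%2==1):
-- 		wynik = wynik + alfabet[int(tekst[-1])%26]
--
-- 	return wynik
-- ===== SOURCE B (Python) =====
-- import string
--
-- alfabet = string.ascii_lowercase
--
-- def operacja7(liczba):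
--     # Character-arithmetic recursion: consume str(liczba) two chars at a time,
--     # computing each chunk's value from char codes (no int() parsing, no index loop).
--     def wartosc(para):
--         if para[0] == '-':
--             return -(ord(para[1]) - 48)
--         v = ord(para[0]) - 48
--         if len(para) == 1:
--             return v
--         return 10 * v + (ord(para[1]) - 48)
--
--     def go(cs):
--         if not cs:
--             return ""
--         return alfabet[wartosc(cs[:2]) % 26] + go(cs[2:])
--
--     return go(str(liczba))
-- ===== Notes on version B (the rewrite author's own statement) =====
-- stated objective: alternative
-- what changed: Replaces the index-arithmetic loop with int() substring parsing plus a separate odd-length branch by a structural recursion that consumes str(liczba) two characters at a time and computes each chunk's value directly from character codes (digit value of each character, with an explicit sign case) instead of calling int().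
import Mathlib
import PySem

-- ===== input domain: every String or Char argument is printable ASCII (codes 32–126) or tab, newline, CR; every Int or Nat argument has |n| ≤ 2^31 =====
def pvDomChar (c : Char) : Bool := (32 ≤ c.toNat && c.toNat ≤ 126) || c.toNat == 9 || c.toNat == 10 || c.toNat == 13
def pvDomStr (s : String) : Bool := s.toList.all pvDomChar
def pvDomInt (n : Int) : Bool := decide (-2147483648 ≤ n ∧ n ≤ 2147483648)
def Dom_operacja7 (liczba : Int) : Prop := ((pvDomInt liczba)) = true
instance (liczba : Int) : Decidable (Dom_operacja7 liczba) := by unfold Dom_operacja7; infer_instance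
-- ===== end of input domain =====

-- B replaces A's index loop + int()-parsing of substrings + separate odd-length branch by a
-- structural recursion consuming str(liczba) two chars at a time, each chunk's value computed
-- from character codes (objective: alternative decomposition, same cost).

-- ===== PORT A =====
-- string.ascii_lowercase
def alfabetA : List Char := "abcdefghijklmnopqrstuvwxyz".toList

def operacja7 (liczba : Int) : String :=
  let tekst : List Char := PySem.Int.toChars liczba
  -- int(len(tekst)/2): true division of a nonneg length then truncation = Nat division by 2
  let n : Nat := tekst.length / 2
  let wynik : List Char :=
    (PySem.List.pyRange 0 (n : Int) 1).foldl
      (fun w i =>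
        w ++ [PySem.List.pyGetD alfabetA
                (PySem.Int.mod ((PySem.Int.ofChars? (PySem.List.slice tekst (some (i*2)) (some (i*2+2)))).getD 0) 26) 'a']) []
  let wynik :=
    if tekst.length % 2 == 1 then
      wynik ++ [PySem.List.pyGetD alfabetA
                 (PySem.Int.mod ((PySem.Int.ofChars? [PySem.List.pyGetD tekst (-1) ' ']).getD 0) 26) 'a']
    else wynik
  String.ofList wynik

-- ===== PORT B =====
def alfabetB : List Char := "abcdefghijklmnopqrstuvwxyz".toList

-- wartosc(para): para[0]/para[1] are only read on chunks of str(liczba), which are nonempty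
-- (and two chars long when para[1] is read), so the getD defaults are unreachable.
def wartoscPort (para : List Char) : Int :=
  if PySem.List.pyGetD para 0 ' ' == '-' then
    -(((PySem.List.pyGetD para 1 ' ').toNat : Int) - 48)
  else
    let v : Int := ((PySem.List.pyGetD para 0 ' ').toNat : Int) - 48
    if para.length == 1 then v
    else 10 * v + (((PySem.List.pyGetD para 1 ' ').toNat : Int) - 48)

-- go(cs): cs[:2] / cs[2:] realised by the structural pattern match
def goPort : List Char → List Char
  | [] => []
  | [a] => [PySem.List.pyGetD alfabetB (PySem.Int.mod (wartoscPort [a]) 26) 'a']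
  | a :: b :: rest =>
      PySem.List.pyGetD alfabetB (PySem.Int.mod (wartoscPort [a, b]) 26) 'a' :: goPort rest

def operacja7_alt (liczba : Int) : String :=
  String.ofList (goPort (PySem.Int.toChars liczba))

-- ===== PRECONDITION & SPEC =====
def Spec_operacja7 (liczba : Int) (out : String) : Prop := out = operacja7_alt liczba
instance (liczba : Int) (out : String) : Decidable (Spec_operacja7 liczba out) := by unfold Spec_operacja7; infer_instance

-- ===== CLAIM (what is proved, stated in full; the proofs are below) =====
def Claim_equal_operacja7 : Prop := ∀ (liczba : Int), Dom_operacja7 liczba → Spec_operacja7 liczba (operacja7 liczba)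

-- ===== LEMMAS AND PROOFS =====

lemma alfabetB_eq : alfabetB = alfabetA := rfl

def f7 (tekst : List Char) (a b : Int) : Char :=
  PySem.List.pyGetD alfabetA
    (PySem.Int.mod ((PySem.Int.ofChars? (PySem.List.slice tekst (some a) (some b))).getD 0) 26) 'a'

-- chunk k of cs, as A's port sees it
def g7 (cs : List Char) (k : Nat) : Char :=
  PySem.List.pyGetD alfabetA
    (PySem.Int.mod ((PySem.Int.ofChars? ((cs.drop (2*k)).take 2)).getD 0) 26) 'a'

def chunkMap (cs : List Char) : List Char := (List.range ((cs.length+1)/2)).map (g7 cs)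

-- core equality: A's character list is the chunk map, for ANY source string
lemma core (tekst : List Char) :
    (if (tekst.length % 2 == 1) = true then
      List.foldl (fun w i => w ++ [f7 tekst (i*2) (i*2+2)]) []
        (PySem.List.pyRange 0 ((tekst.length / 2 : Nat) : Int) 1) ++
        [PySem.List.pyGetD alfabetA
          (PySem.Int.mod ((PySem.Int.ofChars? [PySem.List.pyGetD tekst (-1) ' ']).getD 0) 26) 'a']
    else
      List.foldl (fun w i => w ++ [f7 tekst (i*2) (i*2+2)]) []
        (PySem.List.pyRange 0 ((tekst.length / 2 : Nat) : Int) 1))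
    = chunkMap tekst := by
  simp only [PySem.List.foldl_append_singleton_eq_map, PySem.List.pyRange_zero_natCast,
    List.map_map, List.nil_append, chunkMap]
  have hstep : ∀ k ∈ List.range (tekst.length / 2),
      ((fun i => f7 tekst (i*2) (i*2+2)) ∘ fun k : Nat => (k:Int)) k = g7 tekst k := by
    intro k _
    show f7 tekst ((k:Int)*2) ((k:Int)*2+2) = g7 tekst k
    unfold f7 g7
    rw [show ((k:Int)*2) = ((2*k : Nat) : Int) by push_cast; ring,
        show ((2*k : Nat) : Int) + 2 = ((2*k+2 : Nat) : Int) by push_cast; ring,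
        PySem.List.slice_natCast]
    norm_num
  by_cases hodd : tekst.length % 2 = 1
  · rw [if_pos (by simp [hodd])]
    rw [show (tekst.length+1)/2 = tekst.length/2 + 1 by omega, List.range_succ,
      List.map_append]
    refine congrArg₂ (· ++ ·) (List.map_congr_left hstep) ?_
    have hne : tekst ≠ [] := by
      intro h; rw [h] at hodd; simp at hodd
    unfold g7
    rw [PySem.List.pyGetD_neg_one tekst ' ' hne]
    congr 3
    rw [show 2*(tekst.length/2) = tekst.length - 1 by omega,
        List.drop_length_sub_one hne]
    simp
  · rw [if_neg (by simp [hodd])]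
    rw [show (tekst.length+1)/2 = tekst.length/2 by omega]
    exact List.map_congr_left hstep

-- digit characters
def digs : List Char := ['0','1','2','3','4','5','6','7','8','9']

lemma digitChar_mem (m : Nat) (h : m < 10) : Nat.digitChar m ∈ digs := by
  interval_cases m <;> decide

lemma toDigitsCore_mem : ∀ (f n : Nat) (l : List Char) (c : Char),
    c ∈ Nat.toDigitsCore 10 f n l → c ∈ digs ∨ c ∈ l := by
  intro f
  induction f with
  | zero => intro n l c h; right; simpa [Nat.toDigitsCore] using h
  | succ f ih =>
    intro n l c h
    simp only [Nat.toDigitsCore] at h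
    by_cases h10 : n / 10 = 0
    · rw [if_pos h10] at h
      rcases List.mem_cons.mp h with rfl | h'
      · exact Or.inl (digitChar_mem _ (Nat.mod_lt _ (by norm_num)))
      · exact Or.inr h'
    · rw [if_neg h10] at h
      rcases ih _ _ _ h with hd | hl
      · exact Or.inl hd
      · rcases List.mem_cons.mp hl with rfl | h'
        · exact Or.inl (digitChar_mem _ (Nat.mod_lt _ (by norm_num)))
        · exact Or.inr h'

lemma toDigits_mem (n : Nat) (c : Char) (h : c ∈ Nat.toDigits 10 n) : c ∈ digs := by
  rcases toDigitsCore_mem _ _ _ _ (by simpa [Nat.toDigits] using h) with h' | h'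
  · exact h'
  · simp at h'

lemma toDigitsCore_len : ∀ (f n : Nat) (l : List Char),
    l.length < (Nat.toDigitsCore 10 (f+1) n l).length := by
  intro f
  induction f with
  | zero =>
    intro n l
    simp only [Nat.toDigitsCore]
    split <;> simp
  | succ f ih =>
    intro n l
    simp only [Nat.toDigitsCore]
    split
    · simp
    · exact Nat.lt_trans (by simp) (ih (n/10) (Nat.digitChar (n % 10) :: l))

lemma toDigits_ne_nil (n : Nat) : Nat.toDigits 10 n ≠ [] := by
  have := toDigitsCore_len n n []
  intro h
  rw [Nat.toDigits] at h
  rw [h] at this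
  simp at this

-- chunk-value lemmas: the character-code arithmetic agrees with int() on the actual chunks
lemma val2 (a b : Char) (ha : a ∈ digs) (hb : b ∈ digs) :
    (PySem.Int.ofChars? [a, b]).getD 0 = wartoscPort [a, b] := by
  fin_cases ha <;> fin_cases hb <;> decide

lemma val1 (a : Char) (ha : a ∈ digs) :
    (PySem.Int.ofChars? [a]).getD 0 = wartoscPort [a] := by
  fin_cases ha <;> decide

lemma valneg (b : Char) (hb : b ∈ digs) :
    (PySem.Int.ofChars? ['-', b]).getD 0 = wartoscPort ['-', b] := by
  fin_cases hb <;> decide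

-- chunkMap recurrences
lemma chunkMap_cons2 (a b : Char) (cs : List Char) :
    chunkMap (a :: b :: cs) = g7 (a :: b :: cs) 0 :: chunkMap cs := by
  unfold chunkMap
  rw [show ((a :: b :: cs).length + 1)/2 = (cs.length+1)/2 + 1 by simp; omega,
      List.range_succ_eq_map, List.map_cons, List.map_map]
  congr 1

lemma g7_zero_two (a b : Char) (cs : List Char) :
    g7 (a :: b :: cs) 0 = PySem.List.pyGetD alfabetA
      (PySem.Int.mod ((PySem.Int.ofChars? [a, b]).getD 0) 26) 'a' := rfl

-- B's recursion computes the chunk map on all-digit strings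
lemma go_digits (cs : List Char) (h : ∀ c ∈ cs, c ∈ digs) : goPort cs = chunkMap cs := by
  induction cs using goPort.induct with
  | case1 => rfl
  | case2 a =>
    have hg : g7 [a] 0 = PySem.List.pyGetD alfabetA
        (PySem.Int.mod ((PySem.Int.ofChars? [a]).getD 0) 26) 'a' := rfl
    show _ = chunkMap [a]
    unfold chunkMap
    simp only [List.length_singleton, goPort]
    rw [show (1+1)/2 = 1 by norm_num]
    simp only [List.range_one, List.map_cons, List.map_nil, hg]
    rw [alfabetB_eq, val1 a (h a (by simp))]
  | case3 a b rest ih =>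
    simp only [goPort]
    rw [chunkMap_cons2, g7_zero_two, alfabetB_eq,
        val2 a b (h a (by simp)) (h b (by simp)),
        ih (fun c hc => h c (by simp [hc]))]

-- the full source string: optional '-' then digits
lemma go_eq_chunkMap (liczba : Int) :
    goPort (PySem.Int.toChars liczba) = chunkMap (PySem.Int.toChars liczba) := by
  unfold PySem.Int.toChars
  by_cases hneg : liczba < 0
  · rw [if_pos hneg]
    rcases hds : Nat.toDigits 10 liczba.natAbs with _ | ⟨d, rest⟩
    · exact absurd hds (toDigits_ne_nil _)
    have hd : d ∈ digs := toDigits_mem _ _ (by rw [hds]; simp)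
    have hrest : ∀ c ∈ rest, c ∈ digs := fun c hc =>
      toDigits_mem _ _ (by rw [hds]; simp [hc])
    simp only [goPort]
    rw [chunkMap_cons2, g7_zero_two, alfabetB_eq, valneg d hd, go_digits rest hrest]
  · rw [if_neg hneg]
    exact go_digits _ (fun c hc => toDigits_mem _ _ hc)

-- ===== VERDICT (by name: the statement is the Claim_ definition above) =====
theorem operacja7_spec : Claim_equal_operacja7 := by
  intro liczba _
  unfold Spec_operacja7 operacja7 operacja7_alt
  rw [go_eq_chunkMap]
  exact congrArg String.ofList (core (PySem.Int.toChars liczba))
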